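-- pv_equiv track=rewrite | github.com/aosojnik/pipeline-manager-features-models | pm/features/functions/sleep_util.py | section_peaks
-- ===== SOURCE A (Python) =====
-- def section_peaks(strong_peak_times: "array of strong peak times",
--                    weak_peak_times: "array of weak peak times",
--                    measurement_start: "posix_s of start of measurement",
--                    measurement_end: "posix_s of end of measurement"):
--     """Returns dict={section_start_time:[weak peaks in section times],...}
--     The first section will start at the beggining of the measurement,
--     so in total the number of sections will equal the number of strong peaks plus one."""
--     sections = sorted([measurement_start, *strong_peak_times, measurement_end])
--     dic = dict()
--     for i, sec_start in enumerate(sections[:-1]):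
--         dic[sec_start] = [weak for weak in weak_peak_times if (weak >= sec_start)&(weak < sections[i+1])    ]
--     return dic
-- ===== SOURCE B (Python) =====
-- from bisect import bisect_right
--
-- def section_peaks(strong_peak_times, weak_peak_times, measurement_start, measurement_end):
--     """Bucket each weak peak by binary search into the sorted section bounds,
--     one pass over the weak peaks, instead of re-scanning all weak peaks per section."""
--     sections = sorted([measurement_start, *strong_peak_times, measurement_end])
--     n = len(sections) - 1
--     buckets = [[] for _ in range(n)]
--     for weak in weak_peak_times:
--         i = bisect_right(sections, weak) - 1
--         if 0 <= i < n:
--             buckets[i].append(weak)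
--     return {sections[i]: buckets[i] for i in range(n)}
-- ===== Notes on version B (the rewrite author's own statement) =====
-- stated objective: faster
-- what changed: Instead of scanning all weak peaks once per section (nested loops), B makes a single pass over the weak peaks, binary-searching (bisect_right) each one into its section bucket, then emits the buckets in section order.
import Mathlib
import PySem

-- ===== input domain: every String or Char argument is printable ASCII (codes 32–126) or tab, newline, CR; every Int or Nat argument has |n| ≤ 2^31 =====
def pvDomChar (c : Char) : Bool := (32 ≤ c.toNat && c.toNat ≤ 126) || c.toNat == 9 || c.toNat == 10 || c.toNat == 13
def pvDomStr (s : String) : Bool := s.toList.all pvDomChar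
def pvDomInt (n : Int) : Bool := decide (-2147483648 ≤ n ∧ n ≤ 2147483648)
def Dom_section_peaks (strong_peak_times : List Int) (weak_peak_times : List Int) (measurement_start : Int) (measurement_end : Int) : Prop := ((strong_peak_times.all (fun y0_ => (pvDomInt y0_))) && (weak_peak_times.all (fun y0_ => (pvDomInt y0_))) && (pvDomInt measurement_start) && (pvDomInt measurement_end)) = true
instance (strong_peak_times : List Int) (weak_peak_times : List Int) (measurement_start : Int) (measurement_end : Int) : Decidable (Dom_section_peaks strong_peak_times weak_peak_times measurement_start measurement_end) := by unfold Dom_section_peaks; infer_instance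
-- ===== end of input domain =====

-- B replaces A's per-section rescan of all weak peaks by one pass that binary-searches
-- (bisect_right) each weak peak into its section bucket; measured faster (asymptotic).


-- ===== PORT A =====
-- sections[i+1] is always in range inside the loop (i < len(sections)-1), so pyGetD's
-- default 0 is never used.
def section_peaks (strong_peak_times : List Int) (weak_peak_times : List Int) (measurement_start : Int) (measurement_end : Int) : List (Int × List Int) :=
  let sections := PySem.List.sorted (measurement_start :: (strong_peak_times ++ [measurement_end])) (fun x => x)
  let dic : PySem.Dict Int (List Int) :=
    (PySem.List.enumerate (PySem.List.slice sections none (some (-1)))).foldl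
      (fun dic p =>
        dic.insert p.2 (weak_peak_times.filter
          (fun weak => decide (weak ≥ p.2) && decide (weak < PySem.List.pyGetD sections (p.1 + 1) 0))))
      PySem.Dict.empty
  dic.items

-- ===== PORT B =====
-- buckets[i].append(weak) is ported as setting index i to the extended list; pyGetD/pySetD
-- defaults are never used (the guard 0 ≤ i < n keeps i in range).
def section_peaks_alt (strong_peak_times : List Int) (weak_peak_times : List Int) (measurement_start : Int) (measurement_end : Int) : List (Int × List Int) :=
  let sections := PySem.List.sorted (measurement_start :: (strong_peak_times ++ [measurement_end])) (fun x => x)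
  let n : Int := (sections.length : Int) - 1
  let buckets := weak_peak_times.foldl
    (fun bs weak =>
      let i : Int := (PySem.List.bisectRight sections weak : Int) - 1
      if 0 ≤ i ∧ i < n then PySem.List.pySetD bs i (PySem.List.pyGetD bs i [] ++ [weak]) else bs)
    (List.replicate n.toNat [])
  (((PySem.List.pyRange 0 n 1).map
      (fun i => (PySem.List.pyGetD sections i 0, PySem.List.pyGetD buckets i []))).foldl
    (fun dic p => dic.insert p.1 p.2) (PySem.Dict.empty : PySem.Dict Int (List Int))).items

-- ===== PRECONDITION & SPEC =====
def Spec_section_peaks (strong_peak_times : List Int) (weak_peak_times : List Int) (measurement_start : Int) (measurement_end : Int) (out : List (Int × List Int)) : Prop := out = section_peaks_alt strong_peak_times weak_peak_times measurement_start measurement_end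
instance (strong_peak_times : List Int) (weak_peak_times : List Int) (measurement_start : Int) (measurement_end : Int) (out : List (Int × List Int)) : Decidable (Spec_section_peaks strong_peak_times weak_peak_times measurement_start measurement_end out) := by unfold Spec_section_peaks; infer_instance

-- ===== CLAIM (what is proved, stated in full; the proofs are below) =====
def Claim_equal_section_peaks : Prop := ∀ (strong_peak_times : List Int) (weak_peak_times : List Int) (measurement_start : Int) (measurement_end : Int), Dom_section_peaks strong_peak_times weak_peak_times measurement_start measurement_end → Spec_section_peaks strong_peak_times weak_peak_times measurement_start measurement_end (section_peaks strong_peak_times weak_peak_times measurement_start measurement_end)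

-- ===== LEMMAS AND PROOFS =====

-- enumerate's k-th element
theorem pv_enumerate_getElem? {α : Type} (xs : List α) (s : Int) (k : Nat) :
    (PySem.List.enumerate xs s)[k]? = xs[k]?.map (fun a => (s + (k : Int), a)) := by
  induction xs generalizing s k with
  | nil => simp [PySem.List.enumerate]
  | cons x xs ih =>
    rw [PySem.List.enumerate_cons]
    cases k with
    | zero => simp
    | succ k =>
      rw [List.getElem?_cons_succ, List.getElem?_cons_succ, ih (s + 1) k]
      cases xs[k]? with
      | none => rfl
      | some a =>
        simp only [Option.map_some]
        have : s + 1 + (k : Int) = s + ((k : Nat) + 1 : Nat) := by push_cast; ring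
        rw [this]

-- bisect_right lands in bucket k exactly on the half-open section [T[k], T[k+1])
theorem pv_bisect_bucket (T : List Int) (hT : T.Pairwise (· ≤ ·)) (k : Nat)
    (hk : k + 1 < T.length) (x : Int) :
    (PySem.List.bisectRight T x = k + 1) ↔ (T[k] ≤ x ∧ x < T[k + 1]) := by
  obtain ⟨hle, hlt, hge⟩ := PySem.List.bisectRight_spec T x hT
  constructor
  · intro h
    exact ⟨hlt k (by omega) (by omega), hge (k + 1) hk (by omega)⟩
  · rintro ⟨h1, h2⟩
    by_contra hne
    rcases Nat.lt_or_ge (PySem.List.bisectRight T x) (k + 1) with hb | hb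
    · exact absurd h1 (not_le.mpr (hge k (by omega) (by omega)))
    · exact absurd (hlt (k + 1) hk (by omega)) (not_le.mpr h2)

-- the bucket-distribution loop: bucket k collects exactly the weaks whose bisect index is k
theorem pv_buckets_getElem? (T : List Int) (n : Int)
    (w : List Int) (bs : List (List Int)) (hn : (bs.length : Int) = n) (k : Nat) (hk : k < bs.length) :
    (w.foldl
        (fun bs weak =>
          let i : Int := (PySem.List.bisectRight T weak : Int) - 1
          if 0 ≤ i ∧ i < n then PySem.List.pySetD bs i (PySem.List.pyGetD bs i [] ++ [weak]) else bs)
        bs)[k]? =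
      some (bs[k] ++ w.filter (fun x => decide (PySem.List.bisectRight T x = k + 1))) := by
  induction w generalizing bs with
  | nil => simp [List.getElem?_eq_getElem hk]
  | cons x w ih =>
    simp only [List.foldl_cons, List.filter_cons]
    by_cases hg : (0 : Int) ≤ (PySem.List.bisectRight T x : Int) - 1 ∧
        (PySem.List.bisectRight T x : Int) - 1 < n
    · have hacc : (let i : Int := (PySem.List.bisectRight T x : Int) - 1
          if 0 ≤ i ∧ i < n then PySem.List.pySetD bs i (PySem.List.pyGetD bs i [] ++ [x]) else bs)
          = bs.set ((PySem.List.bisectRight T x : Int) - 1).toNat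
              (bs[((PySem.List.bisectRight T x : Int) - 1).toNat]'(by omega) ++ [x]) := by
        show (if _ ∧ _ then _ else _) = _
        rw [if_pos hg, PySem.List.pySetD_of_nonneg bs _ hg.1,
            PySem.List.pyGetD_eq_getElem bs [] hg.1 (by omega)]
      rw [hacc, ih _ (by simpa using hn) (by simpa using hk)]
      by_cases hx : PySem.List.bisectRight T x = k + 1
      · simp [hx, List.append_assoc]
      · have hidx : PySem.List.bisectRight T x - 1 ≠ k := by omega
        simp [hidx, hx]
    · have hacc : (let i : Int := (PySem.List.bisectRight T x : Int) - 1
          if 0 ≤ i ∧ i < n then PySem.List.pySetD bs i (PySem.List.pyGetD bs i [] ++ [x]) else bs)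
          = bs := by
        show (if _ ∧ _ then _ else _) = _
        rw [if_neg hg]
      rw [hacc, ih bs hn hk]
      have hx : PySem.List.bisectRight T x ≠ k + 1 := by omega
      simp [hx]

-- a fold of keyed inserts is a fold of plain inserts over the list of pairs
theorem pv_foldl_insert_pairs {β : Type} (l : List β) (f1 : β → Int) (f2 : β → List Int)
    (e : PySem.Dict Int (List Int)) :
    l.foldl (fun d p => d.insert (f1 p) (f2 p)) e
      = (l.map (fun p => (f1 p, f2 p))).foldl (fun d q => d.insert q.1 q.2) e := by
  rw [List.foldl_map]

-- the heart of the matter: A and B insert the SAME key/value sequence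
theorem pv_main (s w : List Int) (ms me : Int) :
    section_peaks s w ms me = section_peaks_alt s w ms me := by
  simp only [section_peaks, section_peaks_alt]
  set T := PySem.List.sorted (ms :: (s ++ [me])) (fun x => x) with hTdef
  have hT : T.Pairwise (· ≤ ·) := PySem.List.sorted_pairwise _ _
  have hlen : T.length = s.length + 2 := by
    have h := (PySem.List.sorted_perm (ms :: (s ++ [me])) (fun x => x) false).length_eq
    simp only [List.length_cons, List.length_append, List.length_nil] at h
    rw [hTdef]
    omega
  rw [PySem.List.slice_to_neg_one, pv_foldl_insert_pairs]
  suffices hL :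
      (PySem.List.enumerate T.dropLast).map
        (fun p => (p.2, w.filter
          (fun weak => decide (weak ≥ p.2) && decide (weak < PySem.List.pyGetD T (p.1 + 1) 0))))
      = (PySem.List.pyRange 0 ((T.length : Int) - 1) 1).map
          (fun i => (PySem.List.pyGetD T i 0,
            PySem.List.pyGetD
              (w.foldl
                (fun bs weak =>
                  let j : Int := (PySem.List.bisectRight T weak : Int) - 1
                  if 0 ≤ j ∧ j < (T.length : Int) - 1 then
                    PySem.List.pySetD bs j (PySem.List.pyGetD bs j [] ++ [weak])
                  else bs)
                (List.replicate ((T.length : Int) - 1).toNat []))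
              i [])) by
    rw [hL]
  apply List.ext_getElem?
  intro k
  rw [List.getElem?_map, List.getElem?_map, pv_enumerate_getElem?,
      PySem.List.getElem?_pyRange_one, List.getElem?_dropLast]
  by_cases hk : k < s.length + 1
  · rw [if_pos (by omega), if_pos (by omega), List.getElem?_eq_getElem (by omega)]
    simp only [Option.map_some]
    have hbk := pv_buckets_getElem? T ((T.length : Int) - 1) w
      (List.replicate ((T.length : Int) - 1).toNat []) (by simp; omega) k (by simp; omega)
    have hTk : PySem.List.pyGetD T ((0 : Int) + (k : Int)) 0 = T[k]'(by omega) := by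
      rw [PySem.List.pyGetD_eq_getElem T 0 (by omega) (by omega)]
      congr 1
      omega
    have hTk1 : PySem.List.pyGetD T (((0 : Int) + (k : Int)) + 1) 0 = T[k + 1]'(by omega) := by
      rw [PySem.List.pyGetD_eq_getElem T 0 (by omega) (by omega)]
      congr 1
      omega
    have hbucket : PySem.List.pyGetD
        (w.foldl
          (fun bs weak =>
            let j : Int := (PySem.List.bisectRight T weak : Int) - 1
            if 0 ≤ j ∧ j < (T.length : Int) - 1 then
              PySem.List.pySetD bs j (PySem.List.pyGetD bs j [] ++ [weak])
            else bs)
          (List.replicate ((T.length : Int) - 1).toNat []))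
        ((0 : Int) + (k : Int)) []
        = w.filter (fun x => decide (PySem.List.bisectRight T x = k + 1)) := by
      rw [show ((0 : Int) + (k : Int)) = ((k : Nat) : Int) by omega,
          PySem.List.pyGetD_natCast, List.getD_eq_getElem?_getD, hbk]
      simp [List.getElem_replicate]
    rw [hTk, hTk1, hbucket]
    simp only [Option.some.injEq, Prod.mk.injEq, true_and]
    apply List.filter_congr
    intro x _
    have hiff := pv_bisect_bucket T hT k (by omega) x
    rcases Decidable.em (PySem.List.bisectRight T x = k + 1) with h | h
    · simp [h, (hiff.mp h).1, (hiff.mp h).2]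
    · have := fun h1 h2 => h (hiff.mpr ⟨h1, h2⟩)
      by_cases h1 : T[k]'(by omega) ≤ x
      · simp [h, h1, not_lt.mp (fun h2 => h (hiff.mpr ⟨h1, h2⟩))]
      · simp [h, h1]
  · rw [if_neg (by omega), if_neg (by omega)]
    rfl

-- ===== VERDICT (by name: the statement is the Claim_ definition above) =====
theorem section_peaks_spec : Claim_equal_section_peaks := by
  intro s w ms me _
  exact pv_main s w ms me
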